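-- pv_equiv track=rewrite | github.com/eladkap/leetcode | main.py | reverse_bin_num
-- ===== SOURCE A (Python) =====
-- def reverse_bin_num(num: int) -> str:
--     b = ''
--     while num > 0:
--         d = num % 2
--         b = b + str(d)
--         num //= 2
--
--     res = 0
--     j = 0
--     for i in range(len(b) - 1, -1, -1):
--         res = res + int(b[i]) * 2 ** j
--         j += 1
--
--     return res
-- ===== SOURCE B (Python) =====
-- def reverse_bin_num(num):
--     res = 0
--     while num > 0:
--         res = res * 2 + num % 2
--         num //= 2
--     return res
-- ===== Notes on version B (the rewrite author's own statement) =====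
-- stated objective: simpler
-- what changed: B accumulates the reversed value Horner-style in a single loop, dropping A's intermediate bit-string and its second index-and-power pass.
import Mathlib
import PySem

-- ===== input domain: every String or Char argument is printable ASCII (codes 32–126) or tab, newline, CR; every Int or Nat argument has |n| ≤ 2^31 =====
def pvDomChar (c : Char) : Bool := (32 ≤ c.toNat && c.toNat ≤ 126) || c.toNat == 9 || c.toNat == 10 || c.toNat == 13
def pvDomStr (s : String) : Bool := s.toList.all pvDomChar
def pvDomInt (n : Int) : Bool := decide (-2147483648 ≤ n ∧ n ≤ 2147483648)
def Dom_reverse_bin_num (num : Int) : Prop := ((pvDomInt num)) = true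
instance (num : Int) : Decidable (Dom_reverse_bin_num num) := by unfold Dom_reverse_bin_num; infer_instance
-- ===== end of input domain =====

-- B replaces A's two passes (build a bit string, then re-read it with powers of two)
-- by one Horner-style accumulation loop; same return value, no speed claim.

-- ===== PORT A =====
-- first while loop: b = b + str(num % 2); num //= 2   (b kept as List Char = the Python str)
def rbnLoop1 (num : Int) (b : List Char) : List Char :=
  if num > 0 then
    rbnLoop1 (PySem.Int.floordiv num 2) (b ++ PySem.Int.toChars (PySem.Int.mod num 2))
  else b
termination_by num.toNat
decreasing_by
  simp only [PySem.Int.floordiv_eq_ediv_of_pos (by omega : (0:Int) < 2)]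
  omega

-- int(b[i]) : b[i] is always a digit char here, so getD 0 is exact
def rbnVal (c : Char) : Int := (PySem.Int.ofChars? [c]).getD 0

-- second loop: for i in range(len(b)-1, -1, -1): res += int(b[i]) * 2 ** j; j += 1
-- (j stays ≥ 0 throughout, so 2 ** j is 2 ^ j.toNat exactly; b[i] is always in range, so pyGetD is exact)
def rbnLoop2 (b : List Char) (res j : Int) : Int × Int :=
  (PySem.List.pyRange ((b.length : Int) - 1) (-1) (-1)).foldl
    (fun st i => (st.1 + rbnVal (PySem.List.pyGetD b i ' ') * 2 ^ st.2.toNat, st.2 + 1))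
    (res, j)

def reverse_bin_num (num : Int) : Int :=
  let b := rbnLoop1 num []
  (rbnLoop2 b 0 0).1

-- ===== PORT B =====
-- single loop: res = res * 2 + num % 2; num //= 2
def rbnAltLoop (num res : Int) : Int :=
  if num > 0 then
    rbnAltLoop (PySem.Int.floordiv num 2) (res * 2 + PySem.Int.mod num 2)
  else res
termination_by num.toNat
decreasing_by
  simp only [PySem.Int.floordiv_eq_ediv_of_pos (by omega : (0:Int) < 2)]
  omega

def reverse_bin_num_alt (num : Int) : Int := rbnAltLoop num 0

-- ===== PRECONDITION & SPEC =====
def Spec_reverse_bin_num (num : Int) (out : Int) : Prop := out = reverse_bin_num_alt num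
instance (num : Int) (out : Int) : Decidable (Spec_reverse_bin_num num out) := by unfold Spec_reverse_bin_num; infer_instance

-- ===== CLAIM (what is proved, stated in full; the proofs are below) =====
def Claim_equal_reverse_bin_num : Prop := ∀ (num : Int), Dom_reverse_bin_num num → Spec_reverse_bin_num num (reverse_bin_num num)

-- ===== LEMMAS AND PROOFS =====

-- the LSB-first list of binary digit characters of n
def rbnBits (n : Int) : List Char :=
  if h : 0 < n then (if n % 2 = 1 then '1' else '0') :: rbnBits (n / 2) else []
termination_by n.toNat
decreasing_by omega

-- Horner value of a digit-char list read front-to-back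
def rbnHorner (res : Int) (l : List Char) : Int :=
  l.foldl (fun a c => a * 2 + rbnVal c) res

theorem rbnVal_bit (n : Int) :
    rbnVal (if n % 2 = 1 then '1' else '0') = n % 2 := by
  rcases Int.emod_two_eq n with h2 | h2 <;> simp [h2, rbnVal] <;> decide

theorem rbnBits_pos (n : Int) (h : 0 < n) :
    rbnBits n = (if n % 2 = 1 then '1' else '0') :: rbnBits (n / 2) := by
  rw [rbnBits]; simp [h]

theorem rbnLoop1_eq (n : Int) : ∀ b : List Char, rbnLoop1 n b = b ++ rbnBits n := by
  induction n using rbnBits.induct with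
  | case1 n h ih =>
    intro b
    rw [rbnLoop1, if_pos (by omega), rbnBits_pos n h,
      PySem.Int.floordiv_eq_ediv_of_pos (by omega),
      PySem.Int.mod_eq_emod_of_pos (by omega), ih]
    rcases Int.emod_two_eq n with h2 | h2 <;> simp [h2] <;> rfl
  | case2 n h =>
    intro b
    rw [rbnLoop1, if_neg (by omega), rbnBits, dif_neg h, List.append_nil]

theorem rbnAltLoop_eq (n : Int) : ∀ res : Int, rbnAltLoop n res = rbnHorner res (rbnBits n) := by
  induction n using rbnBits.induct with
  | case1 n h ih =>
    intro res
    rw [rbnAltLoop, if_pos (by omega), rbnBits_pos n h,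
      PySem.Int.floordiv_eq_ediv_of_pos (by omega),
      PySem.Int.mod_eq_emod_of_pos (by omega), ih]
    simp [rbnHorner, rbnVal_bit n]
  | case2 n h =>
    intro res
    rw [rbnAltLoop, if_neg (by omega), rbnBits, dif_neg h]
    rfl

theorem rbnHorner_append (res : Int) (t : List Char) (c : Char) :
    rbnHorner res (t ++ [c]) = rbnHorner res t * 2 + rbnVal c := by
  simp [rbnHorner]

theorem rbnLoop2_eq (b : List Char) : ∀ res j : Int, 0 ≤ j →
    (rbnLoop2 b res j).1 = res + 2 ^ j.toNat * rbnHorner 0 b := by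
  induction b using List.reverseRecOn with
  | nil =>
    intro res j _
    simp [rbnLoop2, rbnHorner]
  | append_singleton t c ih =>
    intro res j hj
    unfold rbnLoop2
    have hlen : ((t ++ [c]).length : Int) - 1 = (t.length : Int) := by
      simp
    rw [hlen, PySem.List.pyRange_neg_one_cons (by omega : (-1:Int) < (t.length : Int)),
      List.foldl_cons]
    have hget : PySem.List.pyGetD (t ++ [c]) ((t.length : Int)) ' ' = c := by
      simp [PySem.List.pyGetD_natCast, List.getD]
    rw [hget]
    have hcongr :
        (PySem.List.pyRange ((t.length : Int) - 1) (-1) (-1)).foldl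
          (fun st i => (st.1 + rbnVal (PySem.List.pyGetD (t ++ [c]) i ' ') * 2 ^ st.2.toNat, st.2 + 1))
          (res + rbnVal c * 2 ^ j.toNat, j + 1)
        = (PySem.List.pyRange ((t.length : Int) - 1) (-1) (-1)).foldl
          (fun st i => (st.1 + rbnVal (PySem.List.pyGetD t i ' ') * 2 ^ st.2.toNat, st.2 + 1))
          (res + rbnVal c * 2 ^ j.toNat, j + 1) := by
      apply PySem.List.foldl_congr_mem
      intro st i hi
      have hmem := (PySem.List.mem_pyRange_neg_one).1 hi
      have h0 : 0 ≤ i := by omega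
      have h1 : i < (t.length : Int) := by omega
      rw [PySem.List.pyGetD_eq_getElem (t ++ [c]) _ h0 (by simp; omega),
        PySem.List.pyGetD_eq_getElem t _ h0 (by simpa using h1)]
      have hlt : i.toNat < t.length := by omega
      simp [List.getElem_append_left hlt]
    rw [hcongr]
    have := ih (res + rbnVal c * 2 ^ j.toNat) (j + 1) (by omega)
    unfold rbnLoop2 at this
    rw [this, rbnHorner_append]
    have hjn : (j + 1).toNat = j.toNat + 1 := by omega
    rw [hjn, pow_succ]
    ring

-- ===== VERDICT (by name: the statement is the Claim_ definition above) =====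
theorem reverse_bin_num_spec : Claim_equal_reverse_bin_num := by
  intro num _
  unfold Spec_reverse_bin_num reverse_bin_num reverse_bin_num_alt
  rw [rbnLoop1_eq, rbnAltLoop_eq, List.nil_append, rbnLoop2_eq _ _ _ le_rfl]
  simp [rbnHorner]
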